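-- pv_equiv track=rewrite | github.com/Kkcode2100/code-test | morpheus_payload_analyzer.py | _generate_example_payloads
-- ===== SOURCE A (Python) =====
-- from typing import Dict, List, Any, Optional, Set
--
-- def _generate_example_payloads(endpoint: str, sample_data: Dict, method: str, item_id: Optional[int] = None) -> Dict[str, Any]:
--     """Generate example payloads for different scenarios."""
--     examples = {}
--
--     # Minimal payload
--     minimal_fields = ["name"]
--     minimal_payload = {k: v for k, v in sample_data.items() if k in minimal_fields}
--     if method == "PUT" and item_id:
--         minimal_payload["id"] = item_id
--     examples["minimal"] = minimal_payload
--
--     # Standard payload (common fields)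
--     standard_fields = ["name", "description", "enabled", "code"]
--     standard_payload = {k: v for k, v in sample_data.items() if k in standard_fields}
--     if method == "PUT" and item_id:
--         standard_payload["id"] = item_id
--     examples["standard"] = standard_payload
--
--     # Full payload (all non-system fields)
--     full_payload = {k: v for k, v in sample_data.items()
--                    if k not in ['id', 'dateCreated', 'lastUpdated', 'createdBy', 'updatedBy']}
--     if method == "PUT" and item_id:
--         full_payload["id"] = item_id
--     examples["full"] = full_payload
--
--     return examples
-- ===== SOURCE B (Python) =====
-- def _generate_example_payloads(endpoint, sample_data, method, item_id=None):
--     """Generate example payloads in one classifying pass over the sample data."""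
--     minimal, standard, full = {}, {}, {}
--     standard_keys = ("name", "description", "enabled", "code")
--     system_keys = ("id", "dateCreated", "lastUpdated", "createdBy", "updatedBy")
--     for k, v in sample_data.items():
--         if k == "name":
--             minimal[k] = v
--         if k in standard_keys:
--             standard[k] = v
--         if k not in system_keys:
--             full[k] = v
--     if method == "PUT" and item_id:
--         for payload in (minimal, standard, full):
--             payload["id"] = item_id
--     return {"minimal": minimal, "standard": standard, "full": full}
-- ===== Notes on version B (the rewrite author's own statement) =====
-- stated objective: alternative
-- what changed: Replaces A's three separate filtering dict-comprehensions (three scans of sample_data) by one classifying pass that routes each (k,v) into the minimal/standard/full payloads, with the PUT id set once at the end.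
import Mathlib
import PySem

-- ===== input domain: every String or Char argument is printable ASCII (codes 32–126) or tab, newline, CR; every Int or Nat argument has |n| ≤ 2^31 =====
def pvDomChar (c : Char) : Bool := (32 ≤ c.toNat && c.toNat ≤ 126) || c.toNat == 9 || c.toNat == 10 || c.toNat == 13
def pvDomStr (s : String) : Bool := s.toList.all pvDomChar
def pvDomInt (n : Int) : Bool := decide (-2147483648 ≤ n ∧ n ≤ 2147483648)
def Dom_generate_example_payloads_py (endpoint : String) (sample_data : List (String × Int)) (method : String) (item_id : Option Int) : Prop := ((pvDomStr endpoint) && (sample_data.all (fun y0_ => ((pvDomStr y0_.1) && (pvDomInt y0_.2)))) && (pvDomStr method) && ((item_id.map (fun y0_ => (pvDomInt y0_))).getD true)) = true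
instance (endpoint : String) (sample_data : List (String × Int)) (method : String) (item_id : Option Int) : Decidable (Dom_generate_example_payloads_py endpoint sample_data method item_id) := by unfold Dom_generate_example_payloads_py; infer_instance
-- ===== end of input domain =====

-- B replaces A's three filtering dict-comprehensions with one classifying pass over the items
-- (same values, same insertion order); objective: alternative decomposition, no speed claim.


-- ===== PORT A =====
-- {k: v for k, v in sample_data.items() if p k} — dict comprehension, insertion order, overwrite keeps position
def pvA_dictComp (sample_data : List (String × Int)) (p : String → Bool) : PySem.Dict String Int :=
  sample_data.foldl (fun acc kv => if p kv.1 then acc.insert kv.1 kv.2 else acc) PySem.Dict.empty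

-- `if method == "PUT" and item_id: payload["id"] = item_id` (done for each of the three payloads)
def pvA_addId (method : String) (item_id : Option Int) (d : PySem.Dict String Int) : PySem.Dict String Int :=
  match item_id with
  | some i => if method == "PUT" && i != 0 then d.insert "id" i else d
  | none => d

def generate_example_payloads_py (endpoint : String) (sample_data : List (String × Int)) (method : String) (item_id : Option Int) : List (String × List (String × Int)) :=
  let minimal_fields : List String := ["name"]
  let minimal_payload := pvA_addId method item_id (pvA_dictComp sample_data (fun k => minimal_fields.contains k))
  let standard_fields : List String := ["name", "description", "enabled", "code"]
  let standard_payload := pvA_addId method item_id (pvA_dictComp sample_data (fun k => standard_fields.contains k))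
  let full_payload := pvA_addId method item_id (pvA_dictComp sample_data (fun k => !(["id", "dateCreated", "lastUpdated", "createdBy", "updatedBy"].contains k)))
  [("minimal", minimal_payload.items), ("standard", standard_payload.items), ("full", full_payload.items)]

-- ===== PORT B =====
def pvB_standard_keys : List String := ["name", "description", "enabled", "code"]
def pvB_system_keys : List String := ["id", "dateCreated", "lastUpdated", "createdBy", "updatedBy"]

-- body of the single classifying loop: route (k, v) into each of the three payloads
def pvB_step (t : PySem.Dict String Int × PySem.Dict String Int × PySem.Dict String Int)
    (kv : String × Int) : PySem.Dict String Int × PySem.Dict String Int × PySem.Dict String Int :=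
  (if kv.1 == "name" then t.1.insert kv.1 kv.2 else t.1,
   if pvB_standard_keys.contains kv.1 then t.2.1.insert kv.1 kv.2 else t.2.1,
   if !(pvB_system_keys.contains kv.1) then t.2.2.insert kv.1 kv.2 else t.2.2)

-- `if method == "PUT" and item_id: payload["id"] = item_id` applied to each payload at the end
def pvB_addId (method : String) (item_id : Option Int) (d : PySem.Dict String Int) : PySem.Dict String Int :=
  match item_id with
  | some i => if method == "PUT" && i != 0 then d.insert "id" i else d
  | none => d

def generate_example_payloads_py_alt (endpoint : String) (sample_data : List (String × Int)) (method : String) (item_id : Option Int) : List (String × List (String × Int)) :=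
  let t := sample_data.foldl pvB_step (PySem.Dict.empty, PySem.Dict.empty, PySem.Dict.empty)
  let minimal := pvB_addId method item_id t.1
  let standard := pvB_addId method item_id t.2.1
  let full := pvB_addId method item_id t.2.2
  [("minimal", minimal.items), ("standard", standard.items), ("full", full.items)]

-- ===== PRECONDITION & SPEC =====
def Spec_generate_example_payloads_py (endpoint : String) (sample_data : List (String × Int)) (method : String) (item_id : Option Int) (out : List (String × List (String × Int))) : Prop := out = generate_example_payloads_py_alt endpoint sample_data method item_id
instance (endpoint : String) (sample_data : List (String × Int)) (method : String) (item_id : Option Int) (out : List (String × List (String × Int))) : Decidable (Spec_generate_example_payloads_py endpoint sample_data method item_id out) := by unfold Spec_generate_example_payloads_py; infer_instance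

-- ===== CLAIM (what is proved, stated in full; the proofs are below) =====
def Claim_equal_generate_example_payloads_py : Prop := ∀ (endpoint : String) (sample_data : List (String × Int)) (method : String) (item_id : Option Int), Dom_generate_example_payloads_py endpoint sample_data method item_id → Spec_generate_example_payloads_py endpoint sample_data method item_id (generate_example_payloads_py endpoint sample_data method item_id)

-- ===== LEMMAS AND PROOFS =====
-- the single classifying pass splits into the three per-payload filtering folds of A
theorem pv_fold_key (l : List (String × Int)) (a b c : PySem.Dict String Int) :
    l.foldl pvB_step (a, b, c) =
      (l.foldl (fun acc kv => if (["name"] : List String).contains kv.1 then acc.insert kv.1 kv.2 else acc) a,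
       l.foldl (fun acc kv => if (["name", "description", "enabled", "code"] : List String).contains kv.1 then acc.insert kv.1 kv.2 else acc) b,
       l.foldl (fun acc kv => if !((["id", "dateCreated", "lastUpdated", "createdBy", "updatedBy"] : List String).contains kv.1) then acc.insert kv.1 kv.2 else acc) c) := by
  induction l generalizing a b c with
  | nil => rfl
  | cons x xs ih =>
    rw [List.foldl_cons, List.foldl_cons, List.foldl_cons, List.foldl_cons, ih]
    simp [pvB_step, pvB_standard_keys, pvB_system_keys]

theorem pv_spec : ∀ (endpoint : String) (sample_data : List (String × Int)) (method : String) (item_id : Option Int),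
    generate_example_payloads_py endpoint sample_data method item_id =
      generate_example_payloads_py_alt endpoint sample_data method item_id := by
  intro endpoint sample_data method item_id
  unfold generate_example_payloads_py generate_example_payloads_py_alt pvA_dictComp pvA_addId pvB_addId
  rw [pv_fold_key]

-- ===== VERDICT (by name: the statement is the Claim_ definition above) =====
theorem generate_example_payloads_py_spec : Claim_equal_generate_example_payloads_py := by
  intro endpoint sample_data method item_id _
  exact pv_spec endpoint sample_data method item_id
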